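-- pv_equiv track=rewrite | github.com/Darvener/pva2024 | 4.py | cnt_rovno
-- ===== SOURCE A (Python) =====
-- def cnt_rovno(intervaly):
--     rovno = {}
--     for i in range(len(intervaly)):
--         for j in range(i + 1, len(intervaly)):
--             if intervaly[i][2] == intervaly[j][2]:
--                 par = (intervaly[i][:2], intervaly[j][:2])
--                 rovno[par] = intervaly[i][2]
--     return rovno
-- ===== SOURCE B (Python) =====
-- def cnt_rovno(intervaly):
--     groups = {}
--     for j, it in enumerate(intervaly):
--         groups.setdefault(it[2], []).append((it[:2], j))
--     rovno = {}
--     for i, it in enumerate(intervaly):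
--         for pref, j in groups[it[2]]:
--             if j > i:
--                 rovno[(it[:2], pref)] = it[2]
--     return rovno
-- ===== Notes on version B (the rewrite author's own statement) =====
-- stated objective: alternative
-- what changed: Replaces the all-pairs double scan with a dict grouping intervals by their third coordinate built in one pass, so each interval is compared only against the later members of its own group.
import Mathlib
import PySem

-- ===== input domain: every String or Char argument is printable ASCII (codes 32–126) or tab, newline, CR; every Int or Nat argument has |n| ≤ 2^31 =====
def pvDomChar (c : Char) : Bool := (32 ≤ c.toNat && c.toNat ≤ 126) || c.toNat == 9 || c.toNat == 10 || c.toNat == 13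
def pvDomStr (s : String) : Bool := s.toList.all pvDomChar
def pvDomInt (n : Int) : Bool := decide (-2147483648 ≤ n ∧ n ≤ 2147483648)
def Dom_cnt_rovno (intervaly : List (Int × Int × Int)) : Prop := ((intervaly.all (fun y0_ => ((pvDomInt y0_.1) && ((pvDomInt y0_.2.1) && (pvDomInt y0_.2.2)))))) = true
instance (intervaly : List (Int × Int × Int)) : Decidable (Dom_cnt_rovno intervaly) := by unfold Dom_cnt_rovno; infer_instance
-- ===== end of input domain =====

-- B replaces A's all-pairs double scan by a dict grouping the intervals by their third
-- coordinate (built in one pass), comparing each interval only against its own group;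
-- same return value (the dict as an association list in insertion order).

-- ===== PORT A =====
def cnt_rovno (intervaly : List (Int × Int × Int)) : List ((Int × Int) × (Int × Int) × Int) :=
  let n : Int := intervaly.length
  let rovno : PySem.Dict ((Int × Int) × (Int × Int)) Int :=
    (PySem.List.pyRange 0 n 1).foldl (fun d i =>
      (PySem.List.pyRange (i + 1) n 1).foldl (fun d j =>
        let xi := PySem.List.pyGetD intervaly i (0, 0, 0)
        let xj := PySem.List.pyGetD intervaly j (0, 0, 0)
        if xi.2.2 = xj.2.2 then
          d.insert ((xi.1, xi.2.1), (xj.1, xj.2.1)) xi.2.2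
        else d) d)
      PySem.Dict.empty
  rovno.items.map (fun kv => (kv.1.1, kv.1.2, kv.2))

-- ===== PORT B =====
def cnt_rovno_alt (intervaly : List (Int × Int × Int)) : List ((Int × Int) × (Int × Int) × Int) :=
  let groups : PySem.Dict Int (List ((Int × Int) × Int)) :=
    (PySem.List.enumerate intervaly).foldl (fun g p =>
      g.modify p.2.2.2 [] (fun l => l ++ [((p.2.1, p.2.2.1), p.1)])) PySem.Dict.empty
  let rovno : PySem.Dict ((Int × Int) × (Int × Int)) Int :=
    (PySem.List.enumerate intervaly).foldl (fun d p =>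
      (groups.getD p.2.2.2 []).foldl (fun d q =>
        if q.2 > p.1 then d.insert ((p.2.1, p.2.2.1), q.1) p.2.2.2 else d) d)
      PySem.Dict.empty
  rovno.items.map (fun kv => (kv.1.1, kv.1.2, kv.2))

-- ===== PRECONDITION & SPEC =====
def Spec_cnt_rovno (intervaly : List (Int × Int × Int)) (out : List ((Int × Int) × (Int × Int) × Int)) : Prop := out = cnt_rovno_alt intervaly
instance (intervaly : List (Int × Int × Int)) (out : List ((Int × Int) × (Int × Int) × Int)) : Decidable (Spec_cnt_rovno intervaly out) := by unfold Spec_cnt_rovno; infer_instance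

-- ===== CLAIM (what is proved, stated in full; the proofs are below) =====
def Claim_equal_cnt_rovno : Prop := ∀ (intervaly : List (Int × Int × Int)), Dom_cnt_rovno intervaly → Spec_cnt_rovno intervaly (cnt_rovno intervaly)

-- ===== LEMMAS AND PROOFS =====

theorem foldl_if_insert {α K V : Type} [BEq K] (l : List α) (c : α → Prop) [DecidablePred c]
    (k : α → K) (v : α → V) (d : PySem.Dict K V) :
    l.foldl (fun d x => if c x then d.insert (k x) (v x) else d) d
      = (l.filterMap (fun x => if c x then some (k x, v x) else none)).foldl
          (fun d y => d.insert y.1 y.2) d := by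
  induction l generalizing d with
  | nil => rfl
  | cons a t ih => by_cases h : c a <;> simp [h, ih]

theorem groups_getD (xs : List (Int × Int × Int)) (v : Int) :
    (((PySem.List.enumerate xs).foldl (fun g p =>
        g.modify p.2.2.2 [] (fun l => l ++ [((p.2.1, p.2.2.1), p.1)])) PySem.Dict.empty).getD v [])
    = ((PySem.List.enumerate xs).filter (fun p => p.2.2.2 == v)).map
        (fun p => ((p.2.1, p.2.2.1), p.1)) := by
  have h := PySem.Dict.getD_foldl_modify_append
    (l := (PySem.List.enumerate xs).map (fun p => (p.2.2.2, ((p.2.1, p.2.2.1), p.1))))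
    (d := (PySem.Dict.empty : PySem.Dict Int (List ((Int × Int) × Int)))) (c := v)
  rw [List.foldl_map] at h
  rw [h]
  simp [PySem.Dict.getD_empty, List.filter_map, List.map_map, Function.comp_def]

theorem inner_lists_eq (xs : List (Int × Int × Int)) (i : Int) (h0 : 0 ≤ i)
    (hn : i < (xs.length : Int)) (xi : Int × Int × Int) :
    ((PySem.List.pyRange (i + 1) (xs.length : Int) 1).filterMap (fun j =>
        if xi.2.2 = (PySem.List.pyGetD xs j (0, 0, 0)).2.2 then
          some (((xi.1, xi.2.1), ((PySem.List.pyGetD xs j (0, 0, 0)).1,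
                 (PySem.List.pyGetD xs j (0, 0, 0)).2.1)), xi.2.2)
        else none))
    = ((((PySem.List.enumerate xs).filter (fun p => p.2.2.2 == xi.2.2)).map
          (fun p => ((p.2.1, p.2.2.1), p.1))).filterMap (fun q =>
        if q.2 > i then some (((xi.1, xi.2.1), q.1), xi.2.2) else none)) := by
  rw [PySem.List.enumerate_eq_map_pyRange (d := ((0:Int), (0:Int), (0:Int)))]
  rw [List.filter_map, List.map_map, List.filterMap_map, List.filterMap_filter]
  simp only [PySem.List.len_eq, Function.comp_def]
  rw [PySem.List.pyRange_one_append 0 (i + 1) (xs.length : Int) (by omega) (by omega),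
      List.filterMap_append]
  have h1 : (PySem.List.pyRange 0 (i + 1) 1).filterMap (fun j =>
      if ((PySem.List.pyGetD xs j ((0:Int),(0:Int),(0:Int))).2.2 == xi.2.2) = true then
        (if j > i then
          some (((xi.1, xi.2.1), ((PySem.List.pyGetD xs j (0,0,0)).1, (PySem.List.pyGetD xs j (0,0,0)).2.1)), xi.2.2)
        else none)
      else none) = [] := by
    apply List.filterMap_eq_nil_iff.mpr
    intro j hj
    have hji := (PySem.List.mem_pyRange_one.mp hj).2
    split_ifs with h hgt
    · omega
    · rfl
    · rfl
  rw [h1, List.nil_append]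
  apply List.filterMap_congr
  intro j hj
  have hji := (PySem.List.mem_pyRange_one.mp hj).1
  have hgt : j > i := by omega
  by_cases h : xi.2.2 = (PySem.List.pyGetD xs j (0, 0, 0)).2.2
  · simp [h, hgt]
  · simp only [beq_iff_eq]
    rw [if_neg h, if_neg (fun hh => h hh.symm)]

theorem inner_eq (xs : List (Int × Int × Int)) (i : Int) (h0 : 0 ≤ i)
    (hn : i < (xs.length : Int)) (xi : Int × Int × Int)
    (d : PySem.Dict ((Int × Int) × (Int × Int)) Int) :
    (PySem.List.pyRange (i + 1) (xs.length : Int) 1).foldl (fun d j =>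
        if xi.2.2 = (PySem.List.pyGetD xs j (0, 0, 0)).2.2 then
          d.insert ((xi.1, xi.2.1),
                    ((PySem.List.pyGetD xs j (0, 0, 0)).1, (PySem.List.pyGetD xs j (0, 0, 0)).2.1))
            xi.2.2
        else d) d
    = (PySem.Dict.getD
        ((PySem.List.enumerate xs).foldl (fun g p =>
          g.modify p.2.2.2 [] (fun l => l ++ [((p.2.1, p.2.2.1), p.1)])) PySem.Dict.empty)
        xi.2.2 ([] : List ((Int × Int) × Int))).foldl (fun d q =>
        if q.2 > i then d.insert ((xi.1, xi.2.1), q.1) xi.2.2 else d) d := by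
  rw [groups_getD]
  exact (foldl_if_insert _ (fun j => xi.2.2 = (PySem.List.pyGetD xs j (0,0,0)).2.2)
        (fun j => ((xi.1, xi.2.1), ((PySem.List.pyGetD xs j (0,0,0)).1, (PySem.List.pyGetD xs j (0,0,0)).2.1)))
        (fun _ => xi.2.2) d).trans
    ((congrArg (List.foldl (fun d y => PySem.Dict.insert d y.1 y.2) d)
        (inner_lists_eq xs i h0 hn xi)).trans
      (foldl_if_insert _ (fun q : (Int × Int) × Int => q.2 > i)
        (fun q : (Int × Int) × Int => ((xi.1, xi.2.1), q.1)) (fun _ => xi.2.2) d).symm)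

theorem cnt_rovno_main (xs : List (Int × Int × Int)) :
    cnt_rovno xs = cnt_rovno_alt xs := by
  unfold cnt_rovno cnt_rovno_alt
  simp only []
  congr 2
  set G := (PySem.List.enumerate xs).foldl (fun g p =>
      g.modify p.2.2.2 [] (fun l => l ++ [((p.2.1, p.2.2.1), p.1)]))
      (PySem.Dict.empty : PySem.Dict Int (List ((Int × Int) × Int))) with hG
  conv_rhs => rw [PySem.List.enumerate_eq_map_pyRange (d := ((0:Int), (0:Int), (0:Int))), List.foldl_map]
  simp only [PySem.List.len_eq]
  apply PySem.List.foldl_congr_mem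
  intro d i hi
  have hm := PySem.List.mem_pyRange_one.mp hi
  rw [hG]
  exact inner_eq xs i hm.1 hm.2 (PySem.List.pyGetD xs i (0, 0, 0)) d

-- ===== VERDICT (by name: the statement is the Claim_ definition above) =====
theorem cnt_rovno_spec : Claim_equal_cnt_rovno := by
  intro xs _
  unfold Spec_cnt_rovno
  exact cnt_rovno_main xs
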